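-- pv_equiv track=rewrite | github.com/Sihui233/refactored_dihedral | hyper-tuning.py | compute_num_neurons
-- ===== SOURCE A (Python) =====
-- def compute_num_neurons(p: int) -> int:
--     """
--     case 1) 8*(2*p)
--     case 2) if 8*(2*p) > (2p)^2, take 2^x, where x is the smallest x where 2^(x+1) >= (2p)^2
--            equiv to num_neurons = ceil_pow2((2p)^2) // 2
--     """
--     group_size = 2 * p
--     full = group_size * group_size
--     cand = 8 * group_size
--     if cand <= full:
--         return cand
--     pow2 = 1
--     while pow2 <= full:
--         pow2 <<= 1
--     return pow2 // 2
-- ===== SOURCE B (Python) =====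
-- def compute_num_neurons(p: int) -> int:
--     group_size = 2 * p
--     full = group_size * group_size
--     cand = 8 * group_size
--     if cand <= full:
--         return cand
--     # here full >= 4, so bit_length >= 3; largest power of two <= full
--     return 1 << (full.bit_length() - 1)
-- ===== Notes on version B (the rewrite author's own statement) =====
-- stated objective: idiomatic
-- what changed: Replaced the doubling while-loop (find first power of two exceeding full, then halve) with the closed-form bit computation 1 << (full.bit_length() - 1), the largest power of two <= full.
import Mathlib
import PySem

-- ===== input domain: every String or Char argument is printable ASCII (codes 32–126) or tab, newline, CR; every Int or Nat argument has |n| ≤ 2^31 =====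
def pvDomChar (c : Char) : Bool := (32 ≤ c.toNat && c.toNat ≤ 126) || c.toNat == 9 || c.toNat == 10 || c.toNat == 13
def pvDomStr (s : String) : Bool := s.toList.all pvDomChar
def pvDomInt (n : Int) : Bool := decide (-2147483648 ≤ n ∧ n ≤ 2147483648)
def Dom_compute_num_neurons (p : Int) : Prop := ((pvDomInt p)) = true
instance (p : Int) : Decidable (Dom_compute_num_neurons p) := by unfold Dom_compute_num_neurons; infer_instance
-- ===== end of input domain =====

-- B replaces A's doubling while-loop with the closed-form bit_length computation (more idiomatic; same values).


-- ===== PORT A =====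
-- the while loop: pow2 = 1; while pow2 <= full: pow2 <<= 1; fuel is a termination device
-- only (pow2 doubles from 1, so full.toNat + 2 steps always suffice; the fallback branch is unreachable).
def pvLoopA (fuel : Nat) (full pow2 : Int) : Int :=
  match fuel with
  | 0 => pow2
  | fuel + 1 => if pow2 ≤ full then pvLoopA fuel full (pow2 * 2) else pow2

def compute_num_neurons (p : Int) : Int :=
  let group_size := 2 * p
  let full := group_size * group_size
  let cand := 8 * group_size
  if cand ≤ full then cand
  else (pvLoopA (full.toNat + 2) full 1) / 2

-- ===== PORT B =====
-- int.bit_length for a nonnegative int (full ≥ 0 always holds here)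
def pvBitLength (n : Int) : Nat := if n ≤ 0 then 0 else Nat.log2 n.toNat + 1

def compute_num_neurons_alt (p : Int) : Int :=
  let group_size := 2 * p
  let full := group_size * group_size
  let cand := 8 * group_size
  if cand ≤ full then cand
  else ((1 : Nat) <<< (pvBitLength full - 1) : Nat)

-- ===== PRECONDITION & SPEC =====
def Spec_compute_num_neurons (p : Int) (out : Int) : Prop := out = compute_num_neurons_alt p
instance (p : Int) (out : Int) : Decidable (Spec_compute_num_neurons p out) := by unfold Spec_compute_num_neurons; infer_instance

-- ===== CLAIM (what is proved, stated in full; the proofs are below) =====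
def Claim_equal_compute_num_neurons : Prop := ∀ (p : Int), Dom_compute_num_neurons p → Spec_compute_num_neurons p (compute_num_neurons p)

-- ===== LEMMAS AND PROOFS =====
-- The loop branch is only reached when 8*(2p) > (2p)^2, i.e. p ∈ {1, 2, 3}.
lemma pv_loop_cases (p : Int) (h : ¬ 8 * (2 * p) ≤ (2 * p) * (2 * p)) :
    p = 1 ∨ p = 2 ∨ p = 3 := by
  push_neg at h
  rcases lt_trichotomy p 0 with hl | hz | hg
  · nlinarith
  · subst hz; omega
  · have h4 : p < 4 := by nlinarith
    omega

-- ===== VERDICT (by name: the statement is the Claim_ definition above) =====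
theorem compute_num_neurons_spec : Claim_equal_compute_num_neurons := by
  intro p _
  unfold Spec_compute_num_neurons compute_num_neurons compute_num_neurons_alt
  by_cases h : 8 * (2 * p) ≤ (2 * p) * (2 * p)
  · simp [h]
  · rcases pv_loop_cases p h with rfl | rfl | rfl <;> decide
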